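-- pv_equiv track=rewrite | github.com/psymoney/prepCodingTest | BOJ/3273.py | answer
-- ===== SOURCE A (Python) =====
-- def answer(L, x) -> int:
--     L.sort()
--     l, r = 0, len(L) - 1
--     cnt = 0
--     while l < r:
--         if L[l] + L[r] == x:
--             cnt += 1
--             l += 1
--             r -= 1
--         elif L[l] + L[r] < x:
--             l += 1
--         else:
--             r -= 1
--     return cnt
-- ===== SOURCE B (Python) =====
-- def answer(L, x) -> int:
--     L.sort()
--     cnt = {}
--     for v in L:
--         cnt[v] = cnt.get(v, 0) + 1
--     total = 0
--     for v, c in cnt.items():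
--         w = x - v
--         if v < w:
--             total += min(c, cnt.get(w, 0))
--         elif v == w:
--             total += c // 2
--     return total
-- ===== Notes on version B (the rewrite author's own statement) =====
-- stated objective: alternative
-- what changed: Replaces the converging two-pointer scan over the sorted list with a frequency dictionary built in one pass and a single loop over its items adding min(cnt[v], cnt[x-v]) per low half of a pair and cnt[x/2]//2 for the self-paired value.
import Mathlib
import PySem

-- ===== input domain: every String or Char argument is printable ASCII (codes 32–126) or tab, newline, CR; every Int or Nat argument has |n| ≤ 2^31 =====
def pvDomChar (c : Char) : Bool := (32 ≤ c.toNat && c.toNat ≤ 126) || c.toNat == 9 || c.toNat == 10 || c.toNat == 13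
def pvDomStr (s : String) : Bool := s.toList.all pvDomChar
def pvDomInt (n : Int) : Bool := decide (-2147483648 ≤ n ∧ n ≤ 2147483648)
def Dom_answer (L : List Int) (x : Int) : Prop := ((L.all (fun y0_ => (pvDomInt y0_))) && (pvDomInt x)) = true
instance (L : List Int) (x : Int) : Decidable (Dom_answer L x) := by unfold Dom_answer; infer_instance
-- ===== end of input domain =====

-- B replaces A's two-pointer scan over the sorted list with a frequency dictionary and one
-- pass over its items (alternative algorithm, same cost). Both Pythons sort L in place; the
-- equivalence proved here is about the return value (the mutation is identical anyway).

-- ===== PORT A =====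
-- the while loop of A; indices l, r are always in range whenever the loop body runs,
-- so pyGetD (Python L[l]) never hits its default
def answerLoop (s : List Int) (x : Int) (l r cnt : Int) : Int :=
  if _h : l < r then
    if PySem.List.pyGetD s l 0 + PySem.List.pyGetD s r 0 = x then
      answerLoop s x (l + 1) (r - 1) (cnt + 1)
    else if PySem.List.pyGetD s l 0 + PySem.List.pyGetD s r 0 < x then
      answerLoop s x (l + 1) r cnt
    else
      answerLoop s x l (r - 1) cnt
  else cnt
termination_by (r - l).toNat
decreasing_by all_goals omega

def answer (L : List Int) (x : Int) : Int :=
  let s := PySem.List.sorted L (fun v => v)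
  answerLoop s x 0 ((s.length : Int) - 1) 0

-- ===== PORT B =====
-- body of B's loop over the counter's items
def answerAltStep (cnt : PySem.Dict Int Int) (x : Int) (total : Int) (p : Int × Int) : Int :=
  let w := x - p.1
  if p.1 < w then total + min p.2 (cnt.getD w 0)
  else if p.1 = w then total + PySem.Int.floordiv p.2 2
  else total

def answer_alt (L : List Int) (x : Int) : Int :=
  let s := PySem.List.sorted L (fun v => v)
  let cnt := PySem.Dict.counter s
  cnt.items.foldl (answerAltStep cnt x) 0

-- ===== PRECONDITION & SPEC =====
def Spec_answer (L : List Int) (x : Int) (out : Int) : Prop := out = answer_alt L x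
instance (L : List Int) (x : Int) (out : Int) : Decidable (Spec_answer L x out) := by unfold Spec_answer; infer_instance

-- ===== CLAIM (what is proved, stated in full; the proofs are below) =====
def Claim_equal_answer : Prop := ∀ (L : List Int) (x : Int), Dom_answer L x → Spec_answer L x (answer L x)

-- ===== LEMMAS AND PROOFS =====

-- per-value contribution of B: matched pairs whose low member is v
def pairG (s : List Int) (x v : Int) : Int :=
  if v < x - v then min ((s.count v : Int)) ((s.count (x - v) : Int))
  else if v = x - v then (s.count v : Int) / 2
  else 0

-- B's total: the contributions summed over a list of candidate values
def pairF (D : List Int) (s : List Int) (x : Int) : Int := (D.map (pairG s x)).sum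

-- the segment s[l..r] (inclusive) of the sorted list
def seg (s : List Int) (l r : Nat) : List Int := (s.drop l).take (r + 1 - l)

lemma answerAltStep_eq (cnt : PySem.Dict Int Int) (x total : Int) (p : Int × Int) :
    answerAltStep cnt x total p = total +
      (if p.1 < x - p.1 then min p.2 (cnt.getD (x - p.1) 0)
       else if p.1 = x - p.1 then PySem.Int.floordiv p.2 2 else 0) := by
  dsimp only [answerAltStep]
  split_ifs with h1 h2 <;> ring

lemma foldl_answerAltStep (cnt : PySem.Dict Int Int) (x : Int) (li : List (Int × Int)) (t : Int) :
    li.foldl (answerAltStep cnt x) t = t +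
      (li.map (fun p => if p.1 < x - p.1 then min p.2 (cnt.getD (x - p.1) 0)
        else if p.1 = x - p.1 then PySem.Int.floordiv p.2 2 else 0)).sum := by
  induction li generalizing t with
  | nil => simp
  | cons p li ih =>
    simp only [List.foldl_cons, List.map_cons, List.sum_cons, ih, answerAltStep_eq]
    ring

lemma answer_alt_eq_pairF (L : List Int) (x : Int) :
    answer_alt L x = pairF (PySem.Set.ofList (PySem.List.sorted L (fun v => v)))
      (PySem.List.sorted L (fun v => v)) x := by
  unfold answer_alt pairF
  rw [foldl_answerAltStep, PySem.Dict.items_counter]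
  simp only [List.map_map, zero_add]
  congr 1
  apply List.map_congr_left
  intro v _
  simp only [Function.comp, pairG, PySem.Dict.getD_counter]
  split_ifs with h1 h2 <;> try rfl
  exact PySem.Int.floordiv_eq_ediv_of_pos (by norm_num)

lemma pairF_congr {s t : List Int} (D : List Int) (x : Int)
    (h : ∀ v ∈ D, pairG s x v = pairG t x v) :
    pairF D s x = pairF D t x := by
  unfold pairF
  congr 1
  exact List.map_congr_left h

-- one element's contribution rises by 1, the rest agree
lemma sum_update (D : List Int) (f h : Int → Int) (a : Int)
    (hD : D.Nodup) (ha : a ∈ D) (h1 : f a = h a + 1)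
    (h2 : ∀ v ∈ D, v ≠ a → f v = h v) :
    (D.map f).sum = (D.map h).sum + 1 := by
  induction D with
  | nil => cases ha
  | cons d D ih =>
    rcases List.mem_cons.mp ha with rfl | hmem
    · have hall : ∀ v ∈ D, f v = h v := by
        intro v hv
        exact h2 v (List.mem_cons_of_mem _ hv) (fun e => (List.nodup_cons.mp hD).1 (e ▸ hv))
      simp only [List.map_cons, List.sum_cons, h1, List.map_congr_left hall]
      ring
    · have hd : f d = h d :=
        h2 d List.mem_cons_self (fun e => (List.nodup_cons.mp hD).1 (e ▸ hmem))
      simp only [List.map_cons, List.sum_cons, hd]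
      rw [ih (List.nodup_cons.mp hD).2 hmem
        (fun v hv hne => h2 v (List.mem_cons_of_mem _ hv) hne)]
      ring

lemma pairG_zero_of_short (s : List Int) (x v : Int) (hs : s.length ≤ 1) :
    pairG s x v = 0 := by
  have h01 : s.count v ≤ 1 := le_trans List.count_le_length hs
  unfold pairG
  split_ifs with h1 h2
  · have h3 : s.count v = 0 ∨ s.count (x - v) = 0 := by
      by_contra hcon
      rw [not_or] at hcon
      have hv1 : v ∈ s := List.count_pos_iff.mp (Nat.pos_of_ne_zero hcon.1)
      have hv2 : x - v ∈ s := List.count_pos_iff.mp (Nat.pos_of_ne_zero hcon.2)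
      match s, hs, hv1, hv2 with
      | [a], _, hv1, hv2 =>
        simp only [List.mem_singleton] at hv1 hv2
        omega
    omega
  · omega
  · rfl

lemma pairF_zero_of_short (D s : List Int) (x : Int) (hs : s.length ≤ 1) :
    pairF D s x = 0 := by
  unfold pairF
  rw [List.map_congr_left (fun v _ => pairG_zero_of_short s x v hs)]
  simp

-- decomposing the segment at the left end
lemma seg_cons (s : List Int) (l r : Nat) (hlr : l ≤ r) (hr : r < s.length) :
    seg s l r = s[l]'(by omega) :: seg s (l + 1) r := by
  unfold seg
  rw [List.drop_eq_getElem_cons (show l < s.length by omega)]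
  rw [show r + 1 - l = (r - l) + 1 by omega, List.take_succ_cons]
  rw [show r - l = r + 1 - (l + 1) by omega]

-- decomposing the segment at the right end
lemma seg_concat (s : List Int) (l r : Nat) (hlr : l ≤ r) (hr1 : 1 ≤ r) (hr : r < s.length) :
    seg s l r = seg s l (r - 1) ++ [s[r]'hr] := by
  unfold seg
  rw [show r + 1 - l = (r - l) + 1 by omega, show r - 1 + 1 - l = r - l by omega]
  rw [List.take_add_one]
  congr 1
  have hd : (s.drop l)[r - l]? = some (s[r]'hr) := by
    rw [List.getElem?_drop, show l + (r - l) = r by omega, List.getElem?_eq_getElem hr]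
  simp [hd]

lemma seg_mem_bounds (s : List Int) (hs : s.Pairwise (· ≤ ·)) (l r : Nat)
    (hlr : l ≤ r) (hr : r < s.length) {v : Int} (hv : v ∈ seg s l r) :
    s[l]'(by omega) ≤ v ∧ v ≤ s[r]'hr := by
  obtain ⟨i, hi, hvi⟩ := List.mem_iff_getElem.mp hv
  have hlen : (seg s l r).length ≤ r + 1 - l := by
    unfold seg
    simp only [List.length_take, List.length_drop]
    omega
  have hir : l + i ≤ r := by omega
  have hgi : (seg s l r)[i]'hi = s[l + i]'(by omega) := by
    unfold seg
    rw [List.getElem_take, List.getElem_drop]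
  have hmono := List.pairwise_iff_getElem.mp hs
  refine ⟨?_, ?_⟩
  · rw [← hvi, hgi]
    rcases Nat.eq_zero_or_pos i with rfl | hip
    · simp
    · exact hmono l (l + i) (by omega) (by omega) (by omega)
  · rw [← hvi, hgi]
    rcases Nat.lt_or_eq_of_le hir with h | h
    · exact hmono (l + i) r (by omega) hr h
    · exact le_of_eq (by congr 1)

-- F1: the smallest element pairs with nothing when head + last < x
lemma pairF_drop_head (D : List Int) (x a b : Int) (t : List Int)
    (hub : ∀ v ∈ a :: t, v ≤ b) (hba : a ≤ b) (hab : a + b < x) :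
    pairF D (a :: t) x = pairF D t x := by
  apply pairF_congr
  intro v _
  have hca : (a :: t).count (x - a) = 0 :=
    List.count_eq_zero.mpr (fun h => by have := hub _ h; omega)
  have hct : t.count (x - a) = 0 :=
    List.count_eq_zero.mpr (fun h => by have := hub _ (List.mem_cons_of_mem _ h); omega)
  by_cases hv1 : v = a
  · subst hv1
    simp only [pairG, if_pos (show v < x - v by omega), hca, hct]
    omega
  · by_cases hv2 : v = x - a
    · have c1 : (a :: t).count v = 0 := hv2 ▸ hca
      have c2 : t.count v = 0 := hv2 ▸ hct
      simp only [pairG]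
      split_ifs <;> omega
    · have c1 : (a :: t).count v = t.count v := List.count_cons_of_ne (Ne.symm hv1)
      have c2 : (a :: t).count (x - v) = t.count (x - v) :=
        List.count_cons_of_ne (fun h => hv2 (by omega))
      simp only [pairG, c1, c2]

-- F2: the largest element pairs with nothing when head + last > x
lemma pairF_drop_last (D : List Int) (x a b : Int) (t : List Int)
    (hlb : ∀ v ∈ t ++ [b], a ≤ v) (hba : a ≤ b) (hab : x < a + b) :
    pairF D (t ++ [b]) x = pairF D t x := by
  apply pairF_congr
  intro v _
  have hcb : (t ++ [b]).count (x - b) = 0 :=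
    List.count_eq_zero.mpr (fun h => by have := hlb _ h; omega)
  have hct : t.count (x - b) = 0 :=
    List.count_eq_zero.mpr (fun h => by have := hlb _ (List.mem_append_left _ h); omega)
  have happ : ∀ u : Int, u ≠ b → (t ++ [b]).count u = t.count u := by
    intro u hu
    rw [List.count_append, List.count_singleton]
    simp [Ne.symm hu]
  by_cases hv1 : v = b
  · subst hv1
    simp only [pairG, if_neg (show ¬ v < x - v by omega),
      if_neg (show ¬ v = x - v by omega)]
  · by_cases hv2 : v = x - b
    · have c1 : (t ++ [b]).count v = 0 := hv2 ▸ hcb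
      have c2 : t.count v = 0 := hv2 ▸ hct
      simp only [pairG]
      split_ifs <;> omega
    · have c1 : (t ++ [b]).count v = t.count v := happ v hv1
      have c2 : (t ++ [b]).count (x - v) = t.count (x - v) :=
        happ (x - v) (fun h => hv2 (by omega))
      simp only [pairG, c1, c2]

-- F3: head + last = x removes exactly one matched pair
lemma pairF_match (D : List Int) (x a b : Int) (m : List Int)
    (hD : D.Nodup) (haD : a ∈ D) (hba : a ≤ b) (hab : a + b = x)
    (hbnd : ∀ v ∈ m, a ≤ v ∧ v ≤ b) :
    pairF D (a :: m ++ [b]) x = pairF D m x + 1 := by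
  have happ : ∀ u : Int, u ≠ a → u ≠ b → (a :: m ++ [b]).count u = m.count u := by
    intro u hu1 hu2
    rw [List.count_append, List.count_cons_of_ne (Ne.symm hu1), List.count_singleton]
    simp [Ne.symm hu2]
  have hcnta : (a :: m ++ [b]).count a = m.count a + (if a = b then 2 else 1) := by
    rw [List.count_append, List.count_cons_self, List.count_singleton]
    by_cases h : a = b
    · subst h
      rw [if_pos (by simp : (a == a) = true), if_pos rfl]
    · rw [if_neg (show ¬ (b == a) = true by
        simp only [beq_iff_eq]; exact fun e => h e.symm), if_neg h]
  unfold pairF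
  apply sum_update _ _ _ a hD haD
  · -- the contribution of a rises by exactly 1
    by_cases hb : a = b
    · have hx : ¬ a < x - a := by omega
      have hx2 : a = x - a := by omega
      simp only [pairG, if_neg hx, if_pos hx2, hcnta, if_pos hb]
      omega
    · have hx : a < x - a := by omega
      have hxb : x - a = b := by omega
      have hcb : (a :: m ++ [b]).count b = m.count b + 1 := by
        rw [List.count_append, List.count_cons_of_ne hb, List.count_singleton]
        simp
      simp only [pairG, hxb, hcnta, if_neg hb, hcb]
      rw [if_pos (show a < b by omega), if_pos (show a < b by omega)]
      push_cast
      omega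
  · -- every other value contributes the same
    intro v _ hva
    by_cases hvb : v = b
    · subst hvb
      have h1 : ¬ v < x - v := by omega
      have h2 : ¬ v = x - v := by
        intro h
        exact hva (by omega)
      simp only [pairG, if_neg h1, if_neg h2]
    · have c1 : (a :: m ++ [b]).count v = m.count v := happ v hva hvb
      have c2 : (a :: m ++ [b]).count (x - v) = m.count (x - v) :=
        happ (x - v) (fun h => hvb (by omega)) (fun h => hva (by omega))
      simp only [pairG, c1, c2]

-- main loop invariant: the two-pointer loop on the segment computes B's sum
lemma answerLoop_eq (s : List Int) (hs : s.Pairwise (· ≤ ·)) (x : Int) :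
    ∀ (n : Nat) (l r cnt : Int), 0 ≤ l → 0 ≤ r → r < (s.length : Int) → (r - l).toNat ≤ n →
      answerLoop s x l r cnt = cnt + pairF (PySem.Set.ofList s) (seg s l.toNat r.toNat) x := by
  intro n
  induction n with
  | zero =>
    intro l r cnt hl hr hrlen hfuel
    have hlr : ¬ l < r := by omega
    rw [answerLoop, dif_neg hlr, pairF_zero_of_short]
    · ring
    · unfold seg
      simp only [List.length_take, List.length_drop]
      omega
  | succ n ih =>
    intro l r cnt hl hr hrlen hfuel
    by_cases hlr : l < r
    · have hlN : l.toNat < r.toNat := by omega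
      have hrN : r.toNat < s.length := by omega
      have hlN' : l.toNat < s.length := by omega
      have hget_l : PySem.List.pyGetD s l 0 = s[l.toNat]'hlN' := by
        rw [PySem.List.pyGetD_of_nonneg _ _ hl, List.getD_eq_getElem _ _ hlN']
      have hget_r : PySem.List.pyGetD s r 0 = s[r.toNat]'hrN := by
        rw [PySem.List.pyGetD_of_nonneg _ _ hr, List.getD_eq_getElem _ _ hrN]
      have hmono := List.pairwise_iff_getElem.mp hs
      have hba : s[l.toNat]'hlN' ≤ s[r.toNat]'hrN := hmono _ _ hlN' hrN hlN
      have hdecomp1 : seg s l.toNat r.toNat = s[l.toNat]'hlN' :: seg s (l.toNat + 1) r.toNat :=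
        seg_cons s l.toNat r.toNat (by omega) hrN
      have hbounds : ∀ v ∈ seg s l.toNat r.toNat,
          s[l.toNat]'hlN' ≤ v ∧ v ≤ s[r.toNat]'hrN :=
        fun v hv => seg_mem_bounds s hs l.toNat r.toNat (by omega) hrN hv
      rw [answerLoop, dif_pos hlr, hget_l, hget_r]
      split_ifs with hab1 hab2
      · -- sum equals x: drop both ends
        have hdecomp2 : seg s (l.toNat + 1) r.toNat =
            seg s (l.toNat + 1) (r.toNat - 1) ++ [s[r.toNat]'hrN] :=
          seg_concat s (l.toNat + 1) r.toNat (by omega) (by omega) hrN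
        rw [ih (l + 1) (r - 1) (cnt + 1) (by omega) (by omega) (by omega) (by omega)]
        rw [show ((l + 1 : Int)).toNat = l.toNat + 1 by omega,
            show ((r - 1 : Int)).toNat = r.toNat - 1 by omega]
        have hmid : ∀ v ∈ seg s (l.toNat + 1) (r.toNat - 1),
            s[l.toNat]'hlN' ≤ v ∧ v ≤ s[r.toNat]'hrN := by
          intro v hv
          exact hbounds v (by rw [hdecomp1, hdecomp2]; simp [hv])
        have haD : s[l.toNat]'hlN' ∈ PySem.Set.ofList s :=
          (PySem.Set.mem_ofList s _).mpr (List.getElem_mem hlN')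
        have := pairF_match (PySem.Set.ofList s) x (s[l.toNat]'hlN') (s[r.toNat]'hrN)
          (seg s (l.toNat + 1) (r.toNat - 1)) (PySem.Set.nodup_ofList s) haD hba hab1 hmid
        simp only [List.cons_append] at this
        rw [hdecomp1, hdecomp2]
        omega
      · -- sum below x: drop the left end
        rw [ih (l + 1) r cnt (by omega) hr hrlen (by omega)]
        rw [show ((l + 1 : Int)).toNat = l.toNat + 1 by omega]
        have := pairF_drop_head (PySem.Set.ofList s) x (s[l.toNat]'hlN') (s[r.toNat]'hrN)
          (seg s (l.toNat + 1) r.toNat)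
          (fun v hv => (hbounds v (by rw [hdecomp1]; exact hv)).2) hba hab2
        rw [hdecomp1] at *
        omega
      · -- sum above x: drop the right end
        have hdecomp3 : seg s l.toNat r.toNat =
            seg s l.toNat (r.toNat - 1) ++ [s[r.toNat]'hrN] :=
          seg_concat s l.toNat r.toNat (by omega) (by omega) hrN
        rw [ih l (r - 1) cnt hl (by omega) (by omega) (by omega)]
        rw [show ((r - 1 : Int)).toNat = r.toNat - 1 by omega]
        have := pairF_drop_last (PySem.Set.ofList s) x (s[l.toNat]'hlN') (s[r.toNat]'hrN)
          (seg s l.toNat (r.toNat - 1))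
          (fun v hv => (hbounds v (by rw [hdecomp3]; exact hv)).1) hba (by omega)
        rw [hdecomp3] at *
        omega
    · rw [answerLoop, dif_neg hlr, pairF_zero_of_short]
      · ring
      · unfold seg
        simp only [List.length_take, List.length_drop]
        omega

-- ===== VERDICT (by name: the statement is the Claim_ definition above) =====
theorem answer_spec : Claim_equal_answer := by
  intro L x _
  unfold Spec_answer
  rw [answer_alt_eq_pairF]
  show answerLoop (PySem.List.sorted L (fun v => v)) x 0
      (((PySem.List.sorted L (fun v => v)).length : Int) - 1) 0 = _
  have hs : (PySem.List.sorted L (fun v => v)).Pairwise (· ≤ ·) := by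
    simpa using PySem.List.sorted_pairwise L (fun v => v)
  set s := PySem.List.sorted L (fun v => v) with hsdef
  rcases Nat.eq_zero_or_pos s.length with hlen | hlen
  · rw [answerLoop, dif_neg (by omega : ¬ (0 : Int) < (s.length : Int) - 1)]
    rw [pairF_zero_of_short _ _ _ (by omega)]
  · rw [answerLoop_eq s hs x s.length 0 ((s.length : Int) - 1) 0 le_rfl (by omega)
      (by omega) (by omega)]
    have : seg s (0 : Int).toNat (((s.length : Int) - 1)).toNat = s := by
      unfold seg
      rw [show ((0 : Int)).toNat = 0 by rfl,
          show (((s.length : Int) - 1)).toNat = s.length - 1 by omega]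
      simp only [List.drop_zero]
      rw [show s.length - 1 + 1 - 0 = s.length by omega, List.take_length]
    rw [this]
    ring
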